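-- pv_equiv track=rewrite | github.com/HazyResearch/act-prm-tinker | src/act_prm/environments/tau2bench/utils.py | parse_observation
-- ===== SOURCE A (Python) =====
-- def parse_observation(obs_str: str) -> str:
--     """
--     Parse a tau2 observation string to extract the meaningful content.
--
--     tau2 formats observations as "role: content" lines (e.g. "user: Hello").
--     This strips known role prefixes so we get just the content.
--
--     Args:
--         obs_str: Raw observation string from tau2's step() or reset().
--
--     Returns:
--         Cleaned observation content with role prefixes removed.
--     """
--     if not obs_str:
--         return ""
--
--     lines = obs_str.strip().split("\n")
--     cleaned_lines: list[str] = []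
--     for line in lines:
--         # Strip known role prefixes
--         for prefix in ["user: ", "tool: ", "assistant: ", "system: "]:
--             if line.startswith(prefix):
--                 line = line[len(prefix):]
--                 break
--         cleaned_lines.append(line)
--     return "\n".join(cleaned_lines)
-- ===== SOURCE B (Python) =====
-- _ROLES = {"user", "tool", "assistant", "system"}
--
-- def parse_observation(obs_str: str) -> str:
--     if not obs_str:
--         return ""
--     out = []
--     for line in obs_str.strip().split("\n"):
--         role, sep, rest = line.partition(": ")
--         out.append(rest if sep and role in _ROLES else line)
--     return "\n".join(out)
-- ===== Notes on version B (the rewrite author's own statement) =====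
-- stated objective: simpler
-- what changed: Per line, the inner loop that tries four role prefixes in order is replaced by a single partition at the first colon-space separator followed by a membership test of the role in a set.
import Mathlib
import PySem

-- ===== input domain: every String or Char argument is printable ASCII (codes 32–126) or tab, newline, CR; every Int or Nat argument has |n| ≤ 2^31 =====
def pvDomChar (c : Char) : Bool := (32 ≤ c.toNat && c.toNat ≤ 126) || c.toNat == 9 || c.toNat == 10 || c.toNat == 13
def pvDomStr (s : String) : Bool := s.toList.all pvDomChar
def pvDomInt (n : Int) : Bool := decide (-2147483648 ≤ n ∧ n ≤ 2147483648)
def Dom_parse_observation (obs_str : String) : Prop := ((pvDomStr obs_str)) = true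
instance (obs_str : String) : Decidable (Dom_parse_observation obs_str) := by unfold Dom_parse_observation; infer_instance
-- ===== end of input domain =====

-- B replaces A's four-way startswith prefix loop per line by one split at the first ": "
-- plus a role-membership test (simpler decomposition; same return value everywhere).


-- ===== PORT A =====
-- the literal list of prefixes A tries, in order
def pvPrefixes : List (List Char) := ["user: ".toList, "tool: ".toList, "assistant: ".toList, "system: ".toList]

-- A's inner 'for prefix in …: if line.startswith(prefix): line = line[len(prefix):]; break'
def pvStripFirst : List (List Char) → List Char → List Char
  | [], line => line
  | p :: ps, line =>
    if PySem.Chars.startswith line p then PySem.Chars.slice line (some (p.length : Int)) none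
    else pvStripFirst ps line

def parse_observation (obs_str : String) : String :=
  if obs_str = "" then ""
  else
    let lines := PySem.Chars.splitOn (PySem.Chars.strip obs_str.toList) "\n".toList
    let cleaned := lines.foldl (fun acc line => acc ++ [pvStripFirst pvPrefixes line]) []
    String.ofList (PySem.Chars.join "\n".toList cleaned)

-- ===== PORT B =====
def pvRoles : List (List Char) := ["user".toList, "tool".toList, "assistant".toList, "system".toList]

-- line.partition(": "): split at the FIRST occurrence of ": "; none when ": " does not occur
def pvPart : List Char → Option (List Char × List Char)
  | [] => none
  | c :: rest =>
    if c = ':' ∧ rest.head? = some ' ' then some ([], rest.tail)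
    else match pvPart rest with
      | some (a, b) => some (c :: a, b)
      | none => none

-- 'rest if sep and role in _ROLES else line'
def pvBLine (line : List Char) : List Char :=
  match pvPart line with
  | some (role, rest) => if role ∈ pvRoles then rest else line
  | none => line

def parse_observation_alt (obs_str : String) : String :=
  if obs_str = "" then ""
  else
    String.ofList (PySem.Chars.join "\n".toList
      ((PySem.Chars.splitOn (PySem.Chars.strip obs_str.toList) "\n".toList).map pvBLine))

-- ===== PRECONDITION & SPEC =====
def Spec_parse_observation (obs_str : String) (out : String) : Prop := out = parse_observation_alt obs_str
instance (obs_str : String) (out : String) : Decidable (Spec_parse_observation obs_str out) := by unfold Spec_parse_observation; infer_instance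

-- ===== CLAIM (what is proved, stated in full; the proofs are below) =====
def Claim_equal_parse_observation : Prop := ∀ (obs_str : String), Dom_parse_observation obs_str → Spec_parse_observation obs_str (parse_observation obs_str)

-- ===== LEMMAS AND PROOFS =====

lemma pvPart_user (t : List Char) : pvPart ("user: ".toList ++ t) = some ("user".toList, t) := by
  simp [pvPart]

lemma pvPart_tool (t : List Char) : pvPart ("tool: ".toList ++ t) = some ("tool".toList, t) := by
  simp [pvPart]

lemma pvPart_assistant (t : List Char) : pvPart ("assistant: ".toList ++ t) = some ("assistant".toList, t) := by
  simp [pvPart]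

lemma pvPart_system (t : List Char) : pvPart ("system: ".toList ++ t) = some ("system".toList, t) := by
  simp [pvPart]

lemma pvPart_eq_append {l a b : List Char} (h : pvPart l = some (a, b)) :
    l = a ++ ':' :: ' ' :: b := by
  induction l generalizing a b with
  | nil => simp [pvPart] at h
  | cons c rest ih =>
    rw [pvPart] at h
    split at h
    · rename_i hc
      obtain ⟨hc1, hc2⟩ := hc
      cases rest with
      | nil => simp at hc2
      | cons d rest' =>
        simp at hc2
        injection h with h'
        injection h' with h1 h2
        subst hc1; subst hc2
        simp [← h1, ← h2]
    · cases hp : pvPart rest with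
      | none => rw [hp] at h; exact absurd h (by simp)
      | some p =>
        rw [hp] at h
        obtain ⟨pa, pb⟩ := p
        injection h with h'
        injection h' with h1 h2
        subst h2
        rw [← h1]
        simp [ih hp]

-- a prefix 'role: ' cannot match when pvPart reports a DIFFERENT role (or no ": " at all)
lemma pvSW_false_of_some {line a b p q : List Char}
    (hfull : ∀ t, pvPart (p ++ t) = some (q, t))
    (hp : pvPart line = some (a, b)) (hne : a ≠ q) :
    PySem.Chars.startswith line p = false := by
  by_contra h
  simp only [Bool.not_eq_false] at h
  obtain ⟨t, ht⟩ := (PySem.Chars.startswith_iff line p).mp h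
  rw [← ht, hfull t] at hp
  exact hne (by injection hp with h'; injection h' with h1 _; exact h1.symm)

lemma pvSW_false_of_none {line p q : List Char}
    (hfull : ∀ t, pvPart (p ++ t) = some (q, t))
    (hp : pvPart line = none) :
    PySem.Chars.startswith line p = false := by
  by_contra h
  simp only [Bool.not_eq_false] at h
  obtain ⟨t, ht⟩ := (PySem.Chars.startswith_iff line p).mp h
  rw [← ht, hfull t] at hp
  exact absurd hp (by simp)

lemma pvSlice_role (r b : List Char) :
    PySem.Chars.slice (r ++ b) (some ((r.length : Nat) : Int)) none = b := by
  rw [PySem.Chars.slice_eq_listSlice, PySem.List.slice_from_natCast]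
  simp

lemma pvLine_eq (line : List Char) : pvStripFirst pvPrefixes line = pvBLine line := by
  unfold pvBLine
  cases hp : pvPart line with
  | none =>
    simp only [pvPrefixes, pvStripFirst,
      pvSW_false_of_none pvPart_user hp, pvSW_false_of_none pvPart_tool hp,
      pvSW_false_of_none pvPart_assistant hp, pvSW_false_of_none pvPart_system hp,
      if_neg Bool.false_ne_true]
  | some ab =>
    obtain ⟨a, b⟩ := ab
    have hl := pvPart_eq_append hp
    simp only [pvPrefixes, pvStripFirst]
    by_cases h1 : a = "user".toList
    · subst h1 hl
      have hsw : PySem.Chars.startswith ("user".toList ++ ':' :: ' ' :: b) "user: ".toList = true :=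
        (PySem.Chars.startswith_iff _ _).mpr ⟨b, rfl⟩
      rw [hsw, if_pos rfl]
      have := pvSlice_role ("user: ".toList) b
      simpa [pvRoles] using this
    · rw [pvSW_false_of_some pvPart_user hp h1, if_neg Bool.false_ne_true]
      by_cases h2 : a = "tool".toList
      · subst h2 hl
        have hsw : PySem.Chars.startswith ("tool".toList ++ ':' :: ' ' :: b) "tool: ".toList = true :=
          (PySem.Chars.startswith_iff _ _).mpr ⟨b, rfl⟩
        rw [hsw, if_pos rfl]
        have := pvSlice_role ("tool: ".toList) b
        simpa [pvRoles] using this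
      · rw [pvSW_false_of_some pvPart_tool hp h2, if_neg Bool.false_ne_true]
        by_cases h3 : a = "assistant".toList
        · subst h3 hl
          have hsw : PySem.Chars.startswith ("assistant".toList ++ ':' :: ' ' :: b) "assistant: ".toList = true :=
            (PySem.Chars.startswith_iff _ _).mpr ⟨b, rfl⟩
          rw [hsw, if_pos rfl]
          have := pvSlice_role ("assistant: ".toList) b
          simpa [pvRoles] using this
        · rw [pvSW_false_of_some pvPart_assistant hp h3, if_neg Bool.false_ne_true]
          by_cases h4 : a = "system".toList
          · subst h4 hl
            have hsw : PySem.Chars.startswith ("system".toList ++ ':' :: ' ' :: b) "system: ".toList = true :=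
              (PySem.Chars.startswith_iff _ _).mpr ⟨b, rfl⟩
            rw [hsw, if_pos rfl]
            have := pvSlice_role ("system: ".toList) b
            simpa [pvRoles] using this
          · rw [pvSW_false_of_some pvPart_system hp h4, if_neg Bool.false_ne_true]
            have h1' : a ≠ ['u','s','e','r'] := by simpa using h1
            have h2' : a ≠ ['t','o','o','l'] := by simpa using h2
            have h3' : a ≠ ['a','s','s','i','s','t','a','n','t'] := by simpa using h3
            have h4' : a ≠ ['s','y','s','t','e','m'] := by simpa using h4
            simp [pvRoles, h1', h2', h3', h4']

-- ===== VERDICT (by name: the statement is the Claim_ definition above) =====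
theorem parse_observation_spec : Claim_equal_parse_observation := by
  intro obs_str _
  unfold Spec_parse_observation parse_observation parse_observation_alt
  split
  · rfl
  · simp only []
    rw [PySem.List.foldl_append_singleton_eq_map, List.nil_append]
    exact congrArg _ (congrArg _ (List.map_congr_left (fun l _ => pvLine_eq l)))
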